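-- pv_equiv track=rewrite | github.com/hans-blok/mandarin-agents | artefacten/fnd/fnd.01.ecosysteem-coordinator/runner/ecosysteem-coordinator.runner.py | format_execution_params
-- ===== SOURCE A (Python) =====
-- from typing import Any, Dict, List, Tuple, Optional, Set, TextIO
--
-- def filter_execution_params(params: Dict[str, str]) -> Dict[str, str]:
--     """Toon alleen parameters die betekenisvol zijn in de execution wrapper."""
--     filtered = dict(params)
--
--     if filtered.get('value_stream_fase'):
--         for redundant_key in ('vs', 'value_stream', 'fase'):
--             filtered.pop(redundant_key, None)
--
--     return filtered
--
-- def format_execution_params(params: Dict[str, str]) -> str: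
--     """Formatteer parameters voor de execution wrapper."""
--     filtered_params = filter_execution_params(params)
--     if not filtered_params:
--         return "  (geen)"
--
--     preferred_order = ['agent_naam', 'agent', 'value_stream_fase']
--     ordered_keys = [key for key in preferred_order if key in filtered_params]
--     ordered_keys.extend([key for key in filtered_params.keys() if key not in ordered_keys])
--
--     return "\n".join([f"  - `{key}`: {filtered_params[key]}" for key in ordered_keys])
-- ===== SOURCE B (Python) =====
-- def filter_execution_params(params):
--     """Toon alleen parameters die betekenisvol zijn in de execution wrapper."""
--     filtered = dict(params)
--     if filtered.get('value_stream_fase'):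
--         for redundant_key in ('vs', 'value_stream', 'fase'):
--             filtered.pop(redundant_key, None)
--     return filtered
--
-- def format_execution_params(params):
--     """Een pass over de parameters: drie vaste slots plus een rest-lijst."""
--     fp = filter_execution_params(params)
--     if not fp:
--         return "  (geen)"
--     agent_naam = agent = fase = None
--     rest = []
--     for k, v in fp.items():
--         if k == 'agent_naam':
--             agent_naam = v
--         elif k == 'agent':
--             agent = v
--         elif k == 'value_stream_fase':
--             fase = v
--         else:
--             rest.append(f"  - `{k}`: {v}")
--     head = [f"  - `{k}`: {v}"
--             for k, v in (('agent_naam', agent_naam), ('agent', agent), ('value_stream_fase', fase))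
--             if v is not None]
--     return "\n".join(head + rest)
-- ===== Notes on version B (the rewrite author's own statement) =====
-- stated objective: alternative
-- what changed: A builds an ordered key list in two passes (preferred-present comprehension, then extend with remaining keys filtered by membership in that list) and looks each key up again when formatting; B makes a single pass over the dict items, routing the three preferred keys into fixed slots and formatting non-preferred items immediately into a rest list, then emits slots followed by rest.
import Mathlib
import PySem

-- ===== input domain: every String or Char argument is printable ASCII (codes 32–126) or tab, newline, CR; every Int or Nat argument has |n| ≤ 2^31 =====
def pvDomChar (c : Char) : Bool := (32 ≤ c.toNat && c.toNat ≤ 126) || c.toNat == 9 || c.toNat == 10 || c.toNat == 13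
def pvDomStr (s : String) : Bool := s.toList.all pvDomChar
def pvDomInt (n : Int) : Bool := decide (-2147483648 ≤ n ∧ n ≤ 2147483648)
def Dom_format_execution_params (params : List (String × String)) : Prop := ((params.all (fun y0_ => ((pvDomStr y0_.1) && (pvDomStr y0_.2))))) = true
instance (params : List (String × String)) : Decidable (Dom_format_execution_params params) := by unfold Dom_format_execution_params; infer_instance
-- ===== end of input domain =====

-- B replaces A's two key-ordering passes by a single pass over the items with three
-- fixed slots plus a rest accumulator (objective: alternative decomposition, same cost).

-- shared helper: the f-string "  - `{key}`: {value}" both Pythons contain verbatim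
def pvLine (k v : String) : String := "  - `" ++ k ++ "`: " ++ v

-- shared helper: filter_execution_params, defined identically in Source A and Source B
-- (dict(params) = Dict.ofList; `if filtered.get('value_stream_fase'):` is truthiness
-- of an Optional[str]: present and non-empty; pop(k, None) = erase)
def pvFilter (params : List (String × String)) : PySem.Dict String String :=
  let filtered := PySem.Dict.ofList params
  if filtered.getD "value_stream_fase" "" ≠ "" then
    ((filtered.erase "vs").erase "value_stream").erase "fase"
  else filtered

-- ===== PORT A =====
def format_execution_params (params : List (String × String)) : String :=
  let fp := pvFilter params
  if fp.size = 0 then "  (geen)"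
  else
    let preferred : List String := ["agent_naam", "agent", "value_stream_fase"]
    let orderedKeys := preferred.filter (fun k => fp.contains k)
    let allKeys := orderedKeys ++ fp.keys.filter (fun k => !(orderedKeys.contains k))
    -- filtered_params[key]: key always comes from fp, so the lookup is getD with unused default
    PySem.Str.join "\n" (allKeys.map (fun k => pvLine k (fp.getD k "")))

-- ===== PORT B =====
-- loop body of B's single pass: three slots (agent_naam, agent, value_stream_fase) + rest
def pvStep (st : Option String × Option String × Option String × List String)
    (kv : String × String) : Option String × Option String × Option String × List String :=
  if kv.1 = "agent_naam" then (some kv.2, st.2.1, st.2.2.1, st.2.2.2)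
  else if kv.1 = "agent" then (st.1, some kv.2, st.2.2.1, st.2.2.2)
  else if kv.1 = "value_stream_fase" then (st.1, st.2.1, some kv.2, st.2.2.2)
  else (st.1, st.2.1, st.2.2.1, st.2.2.2 ++ [pvLine kv.1 kv.2])

def format_execution_params_alt (params : List (String × String)) : String :=
  let fp := pvFilter params
  if fp.size = 0 then "  (geen)"
  else
    let st := fp.items.foldl pvStep (none, none, none, [])
    let head := ([("agent_naam", st.1), ("agent", st.2.1), ("value_stream_fase", st.2.2.1)]
      : List (String × Option String)).filterMap (fun p => p.2.map (fun v => pvLine p.1 v))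
    PySem.Str.join "\n" (head ++ st.2.2.2)

-- ===== PRECONDITION & SPEC =====
def Spec_format_execution_params (params : List (String × String)) (out : String) : Prop := out = format_execution_params_alt params
instance (params : List (String × String)) (out : String) : Decidable (Spec_format_execution_params params out) := by unfold Spec_format_execution_params; infer_instance

-- ===== CLAIM (what is proved, stated in full; the proofs are below) =====
def Claim_equal_format_execution_params : Prop := ∀ (params : List (String × String)), Dom_format_execution_params params → Spec_format_execution_params params (format_execution_params params)

-- ===== LEMMAS AND PROOFS =====

-- last-write value of key k over list L starting from d; with nodup keys this is the
-- first (and only) occurrence, matching Dict.get?'s find?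
def pvPick (k : String) (L : List (String × String)) (d : Option String) : Option String :=
  match L.find? (fun p => p.1 == k) with
  | some p => some p.2
  | none => d

def pvNonPref (p : String × String) : Bool :=
  !(p.1 == "agent_naam") && !(p.1 == "agent") && !(p.1 == "value_stream_fase")

theorem pvPick_not_mem (k : String) (L : List (String × String)) (d : Option String)
    (h : k ∉ L.map Prod.fst) : pvPick k L d = d := by
  unfold pvPick
  have hf : L.find? (fun p => p.1 == k) = none := by
    rw [List.find?_eq_none]
    intro p hp
    simp only [beq_iff_eq]
    intro he
    exact h (by rw [← he]; exact List.mem_map_of_mem hp)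
  simp [hf]

theorem pvErase_nodup (d : PySem.Dict String String) (k : String) (hd : d.keys.Nodup) :
    (d.erase k).keys.Nodup := by
  simp only [PySem.Dict.erase, PySem.Dict.keys]
  exact ((List.filter_sublist (l := d.items)).map _).nodup hd

theorem pvFold_char (L : List (String × String)) (hn : (L.map Prod.fst).Nodup) :
    ∀ (a g f : Option String) (r : List String),
    L.foldl pvStep (a, g, f, r) =
      (pvPick "agent_naam" L a, pvPick "agent" L g, pvPick "value_stream_fase" L f,
       r ++ (L.filter pvNonPref).map (fun p => pvLine p.1 p.2)) := by
  induction L with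
  | nil => intro a g f r; simp [pvPick]
  | cons hd tl ih =>
    intro a g f r
    simp only [List.map_cons, List.nodup_cons] at hn
    obtain ⟨hhd, htl⟩ := hn
    simp only [List.foldl_cons]
    by_cases h1 : hd.1 = "agent_naam"
    · rw [show pvStep (a,g,f,r) hd = (some hd.2, g, f, r) from by simp [pvStep, h1]]
      rw [ih htl]
      rw [pvPick_not_mem "agent_naam" tl (some hd.2) (h1 ▸ hhd)]
      simp [pvPick, pvNonPref, h1]
    · by_cases h2 : hd.1 = "agent"
      · rw [show pvStep (a,g,f,r) hd = (a, some hd.2, f, r) from by simp [pvStep, h2]]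
        rw [ih htl]
        rw [pvPick_not_mem "agent" tl (some hd.2) (h2 ▸ hhd)]
        simp [pvPick, pvNonPref, h2]
      · by_cases h3 : hd.1 = "value_stream_fase"
        · rw [show pvStep (a,g,f,r) hd = (a, g, some hd.2, r) from by simp [pvStep, h3]]
          rw [ih htl]
          rw [pvPick_not_mem "value_stream_fase" tl (some hd.2) (h3 ▸ hhd)]
          simp [pvPick, pvNonPref, h3]
        · rw [show pvStep (a,g,f,r) hd = (a, g, f, r ++ [pvLine hd.1 hd.2]) from by
            simp [pvStep, h1, h2, h3]]
          rw [ih htl]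
          simp [pvPick, pvNonPref, h1, h2, h3]

theorem pvPick_get? (fp : PySem.Dict String String) (k : String) :
    pvPick k fp.items none = fp.get? k := by
  unfold pvPick PySem.Dict.get?
  cases fp.items.find? (fun p => p.1 == k) <;> simp

theorem pvFilter_nodup (params : List (String × String)) : (pvFilter params).keys.Nodup := by
  have base := PySem.Dict.nodup_keys_ofList (κ := String) (ν := String) params
  simp only [pvFilter]
  split
  · exact pvErase_nodup _ _ (pvErase_nodup _ _ (pvErase_nodup _ _ base))
  · exact base

theorem format_execution_params_eq (params : List (String × String)) :
    format_execution_params params = format_execution_params_alt params := by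
  have hn : (pvFilter params).keys.Nodup := pvFilter_nodup params
  simp only [format_execution_params, format_execution_params_alt]
  set fp := pvFilter params with hfp
  by_cases hsz : fp.size = 0
  · simp [hsz]
  · simp only [hsz, if_false]
    have hitems : (fp.items.map Prod.fst).Nodup := hn
    rw [pvFold_char fp.items hitems none none none []]
    simp only [List.nil_append]
    rw [pvPick_get?, pvPick_get?, pvPick_get?]
    have htail : (fp.items.filter pvNonPref).map (fun p => pvLine p.1 p.2)
        = (fp.keys.filter (fun k => !(((["agent_naam", "agent", "value_stream_fase"] : List String).filter
            (fun k => fp.contains k)).contains k))).map (fun k => pvLine k (fp.getD k "")) := by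
      rw [PySem.Dict.items_eq_map_keys fp hn "", List.filter_map, List.map_map]
      have hpred : ∀ k ∈ fp.keys,
          (pvNonPref ∘ (fun k => (k, fp.getD k ""))) k
            = (fun k => !(((["agent_naam", "agent", "value_stream_fase"] : List String).filter
                (fun k => fp.contains k)).contains k)) k := by
        intro k hk
        have hc : fp.contains k = true := (PySem.Dict.contains_iff_mem_keys fp k).mpr hk
        simp only [Function.comp, pvNonPref]
        by_cases e1 : k = "agent_naam"
        · subst e1; simp [hc, List.mem_filter]
        · by_cases e2 : k = "agent"
          · subst e2; simp [hc, List.mem_filter]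
          · by_cases e3 : k = "value_stream_fase"
            · subst e3; simp [hc, List.mem_filter]
            · simp [e1, e2, e3, List.mem_filter]
      rw [List.filter_congr hpred]
      simp [Function.comp]
    have hhead : (([("agent_naam", fp.get? "agent_naam"), ("agent", fp.get? "agent"),
          ("value_stream_fase", fp.get? "value_stream_fase")] : List (String × Option String)).filterMap
            (fun p => p.2.map (fun v => pvLine p.1 v)))
        = (((["agent_naam", "agent", "value_stream_fase"] : List String).filter
            (fun k => fp.contains k)).map (fun k => pvLine k (fp.getD k ""))) := by
      have c1 := PySem.Dict.contains_eq_isSome_get? fp "agent_naam"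
      have c2 := PySem.Dict.contains_eq_isSome_get? fp "agent"
      have c3 := PySem.Dict.contains_eq_isSome_get? fp "value_stream_fase"
      have g1 := PySem.Dict.getD_eq_get?_getD fp "agent_naam" ""
      have g2 := PySem.Dict.getD_eq_get?_getD fp "agent" ""
      have g3 := PySem.Dict.getD_eq_get?_getD fp "value_stream_fase" ""
      cases h1 : fp.get? "agent_naam" <;> cases h2 : fp.get? "agent" <;>
        cases h3 : fp.get? "value_stream_fase" <;>
        simp [List.filter, List.filterMap, c1, c2, c3, g1, g2, g3, h1, h2, h3]
    rw [List.map_append, ← htail, ← hhead]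

-- ===== VERDICT (by name: the statement is the Claim_ definition above) =====
theorem format_execution_params_spec : Claim_equal_format_execution_params := by
  intro params _
  exact format_execution_params_eq params
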